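-- pv_equiv track=rewrite | github.com/SrtoPeixet/TFG | src/utils.py | generate_all_triplets
-- ===== SOURCE A (Python) =====
-- def generate_all_triplets(size=64):
--     result = []
--     for i in range(size):
--       for j in range(size):
--         for z in range(size):
--           if ( (i != j) & (i!= z) & (z!= j)):
--             A = [i,j,z]
--             result.append(A)
--     return result
-- ===== SOURCE B (Python) =====
-- def generate_all_triplets(size=64):
--     def extend(prefix, depth):
--         if depth == 0:
--             return [prefix]
--         out = []
--         for x in range(size):
--             if x not in prefix:
--                 out.extend(extend(prefix + [x], depth - 1))
--         return out
--     return extend([], 3)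
-- ===== Notes on version B (the rewrite author's own statement) =====
-- stated objective: alternative
-- what changed: Replaces the triple-nested generate-and-test loop over the size^3 cube with a recursive backtracking k-permutation enumerator that extends a partial prefix only with indices not already in it (depth fixed at 3), so no three-way distinctness test over the full cube exists.
import Mathlib
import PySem

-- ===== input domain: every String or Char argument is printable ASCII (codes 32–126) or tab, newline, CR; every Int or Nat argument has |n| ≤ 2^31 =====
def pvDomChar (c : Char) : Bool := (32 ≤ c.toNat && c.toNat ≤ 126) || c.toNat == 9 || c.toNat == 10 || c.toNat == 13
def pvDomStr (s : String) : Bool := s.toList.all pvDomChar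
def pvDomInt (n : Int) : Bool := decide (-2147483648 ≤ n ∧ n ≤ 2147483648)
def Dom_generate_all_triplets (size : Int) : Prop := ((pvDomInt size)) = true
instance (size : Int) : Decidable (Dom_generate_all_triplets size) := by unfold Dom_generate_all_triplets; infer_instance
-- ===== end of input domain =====

-- B replaces A's generate-and-test cube with recursive backtracking extension of a prefix
-- by unused indices (alternative decomposition; same asymptotic cost).

-- ===== PORT A =====
def generate_all_triplets (size : Int) : List (List Int) :=
  (PySem.List.pyRange 0 size 1).foldl (fun result i =>
    (PySem.List.pyRange 0 size 1).foldl (fun result j =>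
      (PySem.List.pyRange 0 size 1).foldl (fun result z =>
        if i ≠ j ∧ i ≠ z ∧ z ≠ j then result ++ [[i, j, z]] else result)
        result) result) []

-- ===== PORT B =====
-- recursive helper 'extend' of Source B: extend the prefix with every index not already in it
def pvExtend (size : Int) : List Int → Nat → List (List Int)
  | pfx, 0 => [pfx]
  | pfx, Nat.succ d =>
      (PySem.List.pyRange 0 size 1).foldl (fun out x =>
        if x ∈ pfx then out else out ++ pvExtend size (pfx ++ [x]) d) []

def generate_all_triplets_alt (size : Int) : List (List Int) := pvExtend size [] 3

-- ===== PRECONDITION & SPEC =====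
def Spec_generate_all_triplets (size : Int) (out : List (List Int)) : Prop := out = generate_all_triplets_alt size
instance (size : Int) (out : List (List Int)) : Decidable (Spec_generate_all_triplets size out) := by unfold Spec_generate_all_triplets; infer_instance

-- ===== CLAIM =====
def Claim_equal_generate_all_triplets : Prop := ∀ (size : Int), Dom_generate_all_triplets size → Spec_generate_all_triplets size (generate_all_triplets size)

-- ===== LEMMAS AND PROOFS =====

-- an append-accumulating foldl with an if (append branch first) is acc ++ flatMap of the guarded image
theorem pv_foldl_ite_append {α β : Type} (c : α → Prop) [DecidablePred c] (g : α → List β) :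
    ∀ (l : List α) (acc : List β),
      l.foldl (fun acc x => if c x then acc ++ g x else acc) acc
        = acc ++ l.flatMap (fun x => if c x then g x else []) := by
  intro l
  induction l with
  | nil => simp
  | cons x xs ih =>
      intro acc
      by_cases hx : c x <;> simp [hx, ih]

-- the same for B's loop shape (skip branch first)
theorem pv_foldl_skip_append {α β : Type} (c : α → Prop) [DecidablePred c] (g : α → List β) :
    ∀ (l : List α) (acc : List β),
      l.foldl (fun acc x => if c x then acc else acc ++ g x) acc
        = acc ++ l.flatMap (fun x => if c x then [] else g x) := by
  intro l
  induction l with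
  | nil => simp
  | cons x xs ih =>
      intro acc
      by_cases hx : c x <;> simp [hx, ih]

theorem pv_foldl_append {α β : Type} (g : α → List β) :
    ∀ (l : List α) (acc : List β),
      l.foldl (fun acc x => acc ++ g x) acc = acc ++ l.flatMap g := by
  intro l
  induction l with
  | nil => simp
  | cons x xs ih => intro acc; simp [ih]

theorem generate_all_triplets_eq_alt (size : Int) :
    generate_all_triplets size = generate_all_triplets_alt size := by
  unfold generate_all_triplets generate_all_triplets_alt
  simp only [pv_foldl_ite_append, pv_foldl_skip_append, pv_foldl_append, List.nil_append,
    pvExtend, List.mem_cons, List.not_mem_nil, List.cons_append, or_false, if_false]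
  refine List.flatMap_congr (fun i _ => ?_)
  refine List.flatMap_congr (fun j _ => ?_)
  by_cases hji : j = i
  · subst hji
    simp
  · simp only [hji, if_false]
    induction (PySem.List.pyRange 0 size 1) with
    | nil => rfl
    | cons z zs ih =>
        simp only [List.flatMap_cons, ih]
        congr 1
        by_cases hzi : z = i <;> by_cases hzj : z = j <;>
          simp [hzi, hzj, Ne, eq_comm] <;> tauto

-- ===== VERDICT =====
theorem generate_all_triplets_spec : Claim_equal_generate_all_triplets := by
  intro size _
  exact generate_all_triplets_eq_alt size
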